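-- pv_equiv track=rewrite | github.com/nz2000/Crypto_Algorithm | Crypto_Algorithms.py | decryptV
-- ===== SOURCE A (Python) =====
-- def xor(s1, s2):
--     xor_result = []
--     for i in range(min(len(s1), len(s2))):
--         xor_result.append(int(s1[i]) ^ int(s2[i]))
--     return xor_result
--
-- def decryptV(cipher_text, key):
--     binary_key = ""
--     decrypted_text = ""
--
--     for letter in key:
--         binary_key += format(ord(letter), "b")
--
--     binary_message = xor(cipher_text, binary_key)
--
--     for i in range(0, len(binary_message), 7):
--         letter = "".join(str(e) for e in binary_message[i : i + 7])
--         decrypted_text += chr(int(letter, 2))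
--
--     return decrypted_text
-- ===== SOURCE B (Python) =====
-- def decryptV(cipher_text, key):
--     binary_key = "".join(format(ord(c), "b") for c in key)
--     kbits = [int(c) for c in binary_key]
--     n = min(len(cipher_text), len(binary_key))
--     chars = []
--     for i in range(0, n, 7):
--         v = 0
--         for j in range(i, min(i + 7, n)):
--             v = 2 * v + (int(cipher_text[j]) ^ kbits[j])
--         chars.append(chr(v))
--     return "".join(chars)
-- ===== Notes on version B (the rewrite author's own statement) =====
-- stated objective: faster
-- what changed: B fuses A's two passes (materialize the full XORed bit list, then regroup it into 7-bit strings parsed with int(.,2)) into a single window loop that accumulates each character code arithmetically (v = 2*v + bit, with the key's bits parsed once), building no intermediate xor list, no per-chunk string and doing no base-2 string parsing.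
import Mathlib
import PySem

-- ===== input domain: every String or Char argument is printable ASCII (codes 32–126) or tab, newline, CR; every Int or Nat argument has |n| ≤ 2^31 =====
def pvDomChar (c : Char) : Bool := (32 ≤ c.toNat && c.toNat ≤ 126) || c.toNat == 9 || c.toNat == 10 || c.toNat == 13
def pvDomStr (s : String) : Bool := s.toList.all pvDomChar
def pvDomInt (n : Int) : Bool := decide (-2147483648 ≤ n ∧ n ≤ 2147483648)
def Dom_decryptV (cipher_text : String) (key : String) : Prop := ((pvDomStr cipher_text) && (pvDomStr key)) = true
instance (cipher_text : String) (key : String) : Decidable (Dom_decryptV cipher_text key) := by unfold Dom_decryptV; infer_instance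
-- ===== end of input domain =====

-- B fuses A's xor pass and chunking pass into one window loop that accumulates each character
-- code arithmetically (with the key's bits parsed once), building no intermediate xor list and no per-chunk string.


-- ===== PORT A =====
-- xor(s1, s2); the Option threads int()'s ValueError: none = exception raised
def xorA (s1 s2 : List Char) : Option (List Int) :=
  (PySem.List.pyRange 0 ((min s1.length s2.length : Nat) : Int) 1).foldl
    (fun acc i =>
      match acc, PySem.Int.ofChars? [PySem.List.pyGetD s1 i ' '],
            PySem.Int.ofChars? [PySem.List.pyGetD s2 i ' '] with
      | some r, some a, some b => some (r ++ [PySem.Int.bxor a b])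
      | _, _, _ => none)
    (some [])

-- chr(int("".join(str(e) for e in chunk), 2)); none where Python raises (ValueError, or chr out of range;
-- Char.ofNat is exact for every code this can produce inside Pre_, all < 128)
def chunkCharA (chunk : List Int) : Option Char :=
  (PySem.Int.ofCharsBase? (PySem.Chars.join [] (chunk.map PySem.Int.toChars)) 2).bind
    (fun v => if 0 ≤ v ∧ v < 1114112 then some (Char.ofNat v.toNat) else none)

def decryptV (cipher_text : String) (key : String) : String :=
  let binary_key : List Char :=
    key.toList.foldl (fun bk letter => bk ++ PySem.Int.toBinChars ((letter.toNat : Int))) []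
  match xorA cipher_text.toList binary_key with
  | none => ""          -- unreachable under Pre_ (xor raised)
  | some binary_message =>
    match (PySem.List.pyRange 0 ((binary_message.length : Nat) : Int) 7).foldl
      (fun acc i => acc.bind (fun s =>
        (chunkCharA (PySem.List.slice binary_message (some i) (some (i + 7)))).bind
          (fun c => some (s ++ [c]))))
      (some []) with
    | some cs => String.ofList cs
    | none => ""        -- unreachable under Pre_ (int(letter, 2) raised)

-- ===== PORT B =====
def decryptV_alt (cipher_text : String) (key : String) : String :=
  let binary_key : List Char :=
    PySem.Chars.join [] (key.toList.map (fun c => PySem.Int.toBinChars ((c.toNat : Int))))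
  -- kbits = [int(c) for c in binary_key]; int() cannot fail here (these are binary digits), but its
  -- ValueError is still threaded faithfully
  match binary_key.foldl
      (fun acc c => acc.bind (fun ks => (PySem.Int.ofChars? [c]).map (fun b => ks ++ [b])))
      (some []) with
  | none => ""
  | some kbits =>
    let ct := cipher_text.toList
    let n : Int := ((min ct.length binary_key.length : Nat) : Int)
    match (PySem.List.pyRange 0 n 7).foldl
      (fun acc i => acc.bind (fun out =>
        ((PySem.List.pyRange i (min (i + 7) n) 1).foldl
          (fun v j => v.bind (fun v =>
            (PySem.Int.ofChars? [PySem.List.pyGetD ct j ' ']).map (fun a =>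
              2 * v + PySem.Int.bxor a (PySem.List.pyGetD kbits j 0))))
          (some 0)).bind (fun v =>
            -- chr(v); the range guard is chr's, never hit by this loop's values
            if 0 ≤ v ∧ v < 1114112 then some (out ++ [[Char.ofNat v.toNat]]) else none)))
      (some []) with
    | some cs => String.ofList (PySem.Chars.join [] cs)
    | none => ""        -- unreachable under Pre_ (int(cipher_text[j]) raised)

-- ===== PRECONDITION & SPEC =====
-- length of the binary key both programs build (sum of the bit lengths of the key's characters)
def binKeyLen (key : String) : Nat :=
  (key.toList.map (fun c => (PySem.Int.toBinChars ((c.toNat : Int))).length)).sum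

-- Pre_ excludes exactly the inputs on which Python A raises ValueError: some character of
-- cipher_text that xor() actually reads (the first min(len(cipher_text), len(binary_key)) ones)
-- is not a binary digit, so int(c) or int(letter, 2) fails.
def Pre_decryptV (cipher_text : String) (key : String) : Prop :=
  ((cipher_text.toList.take (binKeyLen key)).all (fun c => c == '0' || c == '1')) = true
instance (cipher_text : String) (key : String) : Decidable (Pre_decryptV cipher_text key) := by
  unfold Pre_decryptV; infer_instance

def pvWitness_decryptV : String × String := ("0110100", "k")

def Spec_decryptV (cipher_text : String) (key : String) (out : String) : Prop := out = decryptV_alt cipher_text key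
instance (cipher_text : String) (key : String) (out : String) : Decidable (Spec_decryptV cipher_text key out) := by unfold Spec_decryptV; infer_instance

-- ===== CLAIM (what is proved, stated in full; the proofs are below) =====
def Claim_equal_decryptV : Prop := ∀ (cipher_text : String) (key : String), Dom_decryptV cipher_text key → Pre_decryptV cipher_text key → Spec_decryptV cipher_text key (decryptV cipher_text key)

-- ===== LEMMAS AND PROOFS =====

-- the bit both programs produce at position j (int('0'/'1') xor, as a character comparison)
def bitZ (ct bk : List Char) (j : Int) : Int :=
  if PySem.List.pyGetD ct j ' ' = PySem.List.pyGetD bk j ' ' then 0 else 1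

-- B's chunk value at window start i
def chB (ct bk : List Char) (N i : Int) : Char :=
  Char.ofNat (((PySem.List.pyRange i (min (i + 7) N) 1).foldl
    (fun v j => 2 * v + bitZ ct bk j) (0 : Int)).toNat)

lemma join_nil_flatten (ps : List (List Char)) : PySem.Chars.join [] ps = ps.flatten := by
  induction ps with
  | nil => rfl
  | cons a t ih =>
    cases t with
    | nil => simp [PySem.Chars.join, List.intercalate]
    | cons b u =>
      simp only [PySem.Chars.join, List.intercalate] at *
      simp [List.intersperse] at *
      simp [ih]

lemma flatten_singletons {α : Type} (g : Int → α) (R : List Int) :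
    (List.map (fun i => [g i]) R).flatten = List.map g R := by
  induction R with
  | nil => rfl
  | cons a t ih => simp [ih]

-- every character of Nat.toDigits 2 m is a binary digit
lemma digits2_mem (m : Nat) : ∀ c ∈ Nat.toDigits 2 m, c = '0' ∨ c = '1' := by
  induction m using Nat.strong_induction_on with
  | _ m ih =>
    intro c hc
    rcases Nat.lt_or_ge m 2 with h2 | h2
    · interval_cases m <;> rw [Nat.toDigits_of_lt_base (by norm_num)] at hc <;> simp at hc <;>
        simp [hc] <;> decide
    · have h := Nat.toDigits_append_toDigits (b := 2) (n := m / 2) (d := m % 2) (by norm_num)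
        (by omega) (by omega)
      rw [show 2 * (m / 2) + m % 2 = m from by omega] at h
      rw [← h] at hc
      rcases List.mem_append.1 hc with hm | hm
      · exact ih (m / 2) (by omega) c hm
      · have e : m % 2 = 0 ∨ m % 2 = 1 := by omega
        rcases e with e | e <;> rw [e, Nat.toDigits_of_lt_base (by norm_num)] at hm <;>
          simp at hm <;> simp [hm] <;> decide

-- an Option-threaded fold that never fails is the plain fold
lemma foldl_option {α β : Type} (step : Option α → β → Option α) (f : α → β → α) (R : List β)
    (h : ∀ x ∈ R, ∀ v, step (some v) x = some (f v x)) (v0 : α) :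
    R.foldl step (some v0) = some (R.foldl f v0) := by
  induction R generalizing v0 with
  | nil => simp
  | cons a R ih =>
    simp only [List.foldl_cons, h a (by simp)]
    exact ih (fun x hx v => h x (by simp [hx]) v) (f v0 a)

-- int("".join(str(e) for e in l), 2) on a nonempty list of at most 7 bits
lemma chunk_parse (l : List Int) (hb : ∀ x ∈ l, x = 0 ∨ x = 1) (hne : l ≠ [])
    (hlen : l.length ≤ 7) :
    PySem.Int.ofCharsBase? (PySem.Chars.join [] (l.map PySem.Int.toChars)) 2 =
      some (l.foldl (fun v b => 2 * v + b) 0) := by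
  rcases l with _ | ⟨a, _ | ⟨b, _ | ⟨c, _ | ⟨d, _ | ⟨e, _ | ⟨f, _ | ⟨g, _ | ⟨x, t⟩⟩⟩⟩⟩⟩⟩⟩
  · exact absurd rfl hne
  · rcases hb a (by simp) with rfl | rfl <;> decide
  · rcases hb a (by simp) with rfl | rfl <;> rcases hb b (by simp) with rfl | rfl <;> decide
  · rcases hb a (by simp) with rfl | rfl <;> rcases hb b (by simp) with rfl | rfl <;>
      rcases hb c (by simp) with rfl | rfl <;> decide
  · rcases hb a (by simp) with rfl | rfl <;> rcases hb b (by simp) with rfl | rfl <;>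
      rcases hb c (by simp) with rfl | rfl <;> rcases hb d (by simp) with rfl | rfl <;> decide
  · rcases hb a (by simp) with rfl | rfl <;> rcases hb b (by simp) with rfl | rfl <;>
      rcases hb c (by simp) with rfl | rfl <;> rcases hb d (by simp) with rfl | rfl <;>
      rcases hb e (by simp) with rfl | rfl <;> decide
  · rcases hb a (by simp) with rfl | rfl <;> rcases hb b (by simp) with rfl | rfl <;>
      rcases hb c (by simp) with rfl | rfl <;> rcases hb d (by simp) with rfl | rfl <;>
      rcases hb e (by simp) with rfl | rfl <;> rcases hb f (by simp) with rfl | rfl <;> decide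
  · rcases hb a (by simp) with rfl | rfl <;> rcases hb b (by simp) with rfl | rfl <;>
      rcases hb c (by simp) with rfl | rfl <;> rcases hb d (by simp) with rfl | rfl <;>
      rcases hb e (by simp) with rfl | rfl <;> rcases hb f (by simp) with rfl | rfl <;>
      rcases hb g (by simp) with rfl | rfl <;> decide
  · simp at hlen; omega

lemma fold01_bounds (l : List Int) (hb : ∀ x ∈ l, x = 0 ∨ x = 1) (init : Int)
    (h0 : 0 ≤ init) :
    0 ≤ l.foldl (fun v b => 2 * v + b) init ∧
      l.foldl (fun v b => 2 * v + b) init < (init + 1) * 2 ^ l.length := by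
  induction l generalizing init with
  | nil => simpa using by omega
  | cons a l ih =>
    have ha := hb a (by simp)
    have h := ih (fun x hx => hb x (by simp [hx])) (2 * init + a) (by omega)
    simp only [List.foldl_cons, List.length_cons]
    refine ⟨h.1, ?_⟩
    calc _ < (2 * init + a + 1) * 2 ^ l.length := h.2
      _ ≤ (init + 1) * 2 ^ (l.length + 1) := by
          rcases ha with rfl | rfl <;>
            · rw [pow_succ]; nlinarith [pow_pos (show (0:Int) < 2 by norm_num) l.length]

-- A's xor() result, characterised as bits
lemma xorA_eq (ct bk : List Char)
    (hbin : ∀ i : Int, 0 ≤ i → i < ((min ct.length bk.length : Nat) : Int) →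
      (PySem.List.pyGetD ct i ' ' = '0' ∨ PySem.List.pyGetD ct i ' ' = '1') ∧
      (PySem.List.pyGetD bk i ' ' = '0' ∨ PySem.List.pyGetD bk i ' ' = '1')) :
    xorA ct bk =
      some ((PySem.List.pyRange 0 ((min ct.length bk.length : Nat) : Int) 1).map (bitZ ct bk)) := by
  unfold xorA
  rw [foldl_option _ (fun r i => r ++ [bitZ ct bk i]) _ ?_ []]
  · rw [PySem.List.foldl_append_singleton_eq_map, List.nil_append]
  · intro i hi t
    rw [PySem.List.mem_pyRange_one] at hi
    obtain ⟨hA, hB⟩ := hbin i hi.1 hi.2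
    simp only [bitZ]
    rcases hA with hA | hA <;> rcases hB with hB | hB <;> rw [hA, hB] <;> rfl

lemma take_drop_pyRange (N i : Int) (h0 : 0 ≤ i) (h1 : i < N) :
    List.take 7 (List.drop i.toNat (PySem.List.pyRange 0 N 1)) =
      PySem.List.pyRange i (min (i + 7) N) 1 := by
  apply List.ext_getElem
  · simp [PySem.List.length_pyRange_one]; omega
  · intro k hk1 hk2
    rw [List.getElem_take, List.getElem_drop, PySem.List.getElem_pyRange_one,
      PySem.List.getElem_pyRange_one]
    omega

-- each of A's chunk characters is exactly B's window value
lemma chunkA_eq (ct bk : List Char) (N i : Int)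
    (h0 : 0 ≤ i) (h1 : i < N) :
    chunkCharA (PySem.List.slice
        ((PySem.List.pyRange 0 N 1).map (bitZ ct bk))
        (some i) (some (i + 7))) =
      some (chB ct bk N i) := by
  have hslice : PySem.List.slice ((PySem.List.pyRange 0 N 1).map (bitZ ct bk))
      (some i) (some (i + 7)) =
      (PySem.List.pyRange i (min (i + 7) N) 1).map (bitZ ct bk) := by
    rw [PySem.List.slice_toNat _ h0 (by omega)]
    rw [show (i + 7).toNat - i.toNat = 7 from by omega]
    rw [← List.map_drop, ← List.map_take, take_drop_pyRange N i h0 h1]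
  rw [hslice]
  have hb : ∀ x ∈ (PySem.List.pyRange i (min (i + 7) N) 1).map (bitZ ct bk), x = 0 ∨ x = 1 := by
    intro x hx
    obtain ⟨j, _, rfl⟩ := List.mem_map.1 hx
    unfold bitZ; split <;> simp
  have hlen : ((PySem.List.pyRange i (min (i + 7) N) 1).map (bitZ ct bk)).length ≤ 7 := by
    simp [PySem.List.length_pyRange_one]; omega
  have hne : (PySem.List.pyRange i (min (i + 7) N) 1).map (bitZ ct bk) ≠ [] := by
    apply List.ne_nil_of_length_pos
    simp [PySem.List.length_pyRange_one]; omega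
  unfold chunkCharA
  rw [chunk_parse _ hb hne hlen]
  obtain ⟨hge, hlt⟩ := fold01_bounds _ hb 0 le_rfl
  rw [Option.bind_some, if_pos ⟨hge, by
    calc _ < (0 + 1) * 2 ^ ((PySem.List.pyRange i (min (i + 7) N) 1).map (bitZ ct bk)).length := hlt
      _ ≤ 2 ^ 7 := by
          rw [zero_add, one_mul]
          exact pow_le_pow_right₀ (by norm_num) hlen
      _ < 1114112 := by norm_num⟩]
  unfold chB
  refine congrArg (fun z : Int => some (Char.ofNat z.toNat)) ?_
  rw [List.foldl_map]

-- B's inner window value has the same bit bounds as A's chunk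
lemma chBval_bounds (ct bk : List Char) (N i : Int) :
    0 ≤ (PySem.List.pyRange i (min (i + 7) N) 1).foldl (fun v j => 2 * v + bitZ ct bk j) (0 : Int) ∧
      (PySem.List.pyRange i (min (i + 7) N) 1).foldl (fun v j => 2 * v + bitZ ct bk j) (0 : Int) < 128 := by
  have hb : ∀ x ∈ (PySem.List.pyRange i (min (i + 7) N) 1).map (bitZ ct bk), x = 0 ∨ x = 1 := by
    intro x hx
    obtain ⟨j, _, rfl⟩ := List.mem_map.1 hx
    unfold bitZ; split <;> simp
  obtain ⟨hge, hlt⟩ := fold01_bounds _ hb 0 le_rfl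
  rw [List.foldl_map] at hge hlt
  refine ⟨hge, lt_of_lt_of_le hlt ?_⟩
  have hlen : ((PySem.List.pyRange i (min (i + 7) N) 1).map (bitZ ct bk)).length ≤ 7 := by
    simp [PySem.List.length_pyRange_one]; omega
  calc ((0 : Int) + 1) * 2 ^ ((PySem.List.pyRange i (min (i + 7) N) 1).map (bitZ ct bk)).length
      ≤ (2 : Int) ^ 7 := by
        rw [zero_add, one_mul]
        exact pow_le_pow_right₀ (by norm_num) hlen
    _ = 128 := by norm_num

-- ===== VERDICT (by name: the statement is the Claim_ definition above) =====
theorem decryptV_spec : Claim_equal_decryptV := by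
  intro cipher_text key _ hpre
  simp only [Pre_decryptV, List.all_eq_true, Bool.or_eq_true, beq_iff_eq] at hpre
  unfold Spec_decryptV
  simp only [decryptV, decryptV_alt]
  set ct := cipher_text.toList with hct
  set f : Char → List Char := fun c => PySem.Int.toBinChars ((c.toNat : Int)) with hf
  have hAkey : key.toList.foldl (fun bk c => bk ++ f c) [] = key.toList.flatMap f := by
    simpa using PySem.List.foldl_append_eq_flatMap f key.toList []
  have hBkey : PySem.Chars.join [] (key.toList.map f) = key.toList.flatMap f := by
    rw [join_nil_flatten, ← List.flatMap_def]
  rw [hAkey, hBkey]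
  set BK := key.toList.flatMap f with hBK
  have hbkbin : ∀ c ∈ BK, c = '0' ∨ c = '1' := by
    intro c hc
    obtain ⟨a, _, hca⟩ := List.mem_flatMap.1 hc
    simp only [hf, PySem.Int.toBinChars, if_neg (by omega : ¬ ((a.toNat : Int) < 0)),
      Int.toNat_natCast] at hca
    exact digits2_mem _ c hca
  have hbklen : BK.length = binKeyLen key := by
    simp [hBK, List.length_flatMap, binKeyLen, hf]
  -- kbits = the digit values of BK
  have hkbits : BK.foldl
      (fun acc c => acc.bind (fun ks => (PySem.Int.ofChars? [c]).map (fun b => ks ++ [b])))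
      (some []) = some (BK.map (fun c => if c = '1' then (1 : Int) else 0)) := by
    rw [foldl_option _ (fun ks c => ks ++ [if c = '1' then (1 : Int) else 0]) _ ?_ []]
    · rw [PySem.List.foldl_append_singleton_eq_map, List.nil_append]
    · intro c hc v
      rcases hbkbin c hc with rfl | rfl <;> rfl
  rw [hkbits]
  simp only []
  have hbin : ∀ i : Int, 0 ≤ i → i < ((min ct.length BK.length : Nat) : Int) →
      (PySem.List.pyGetD ct i ' ' = '0' ∨ PySem.List.pyGetD ct i ' ' = '1') ∧
      (PySem.List.pyGetD BK i ' ' = '0' ∨ PySem.List.pyGetD BK i ' ' = '1') := by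
    intro i p q
    constructor
    · rw [PySem.List.pyGetD_eq_getElem ct ' ' p (by omega)]
      apply hpre
      have hlt : i.toNat < (ct.take (binKeyLen key)).length := by
        rw [List.length_take, ← hbklen]; omega
      have hm := List.getElem_mem hlt
      rwa [List.getElem_take] at hm
    · rw [PySem.List.pyGetD_eq_getElem BK ' ' p (by omega)]
      exact hbkbin _ (List.getElem_mem (by omega))
  rw [xorA_eq ct BK hbin]
  simp only []
  have hlenbm : ((((PySem.List.pyRange 0 ((min ct.length BK.length : Nat) : Int) 1).map
      (bitZ ct BK)).length : Nat) : Int) = ((min ct.length BK.length : Nat) : Int) := by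
    simp [PySem.List.length_pyRange_one]
  rw [hlenbm]
  -- A's outer loop
  have hstepA : ∀ i ∈ PySem.List.pyRange 0 ((min ct.length BK.length : Nat) : Int) 7,
      ∀ t : List Char,
      ((some t).bind fun s =>
        (chunkCharA (PySem.List.slice
            ((PySem.List.pyRange 0 ((min ct.length BK.length : Nat) : Int) 1).map (bitZ ct BK))
            (some i) (some (i + 7)))).bind fun c => some (s ++ [c])) =
      some (t ++ [chB ct BK ((min ct.length BK.length : Nat) : Int) i]) := by
    intro i hi t
    obtain ⟨p, q, -⟩ := (PySem.List.mem_pyRange_iff_of_pos (by norm_num) i).1 hi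
    rw [Option.bind_some, chunkA_eq ct BK _ i p q, Option.bind_some]
  rw [foldl_option _ (fun s i => s ++ [chB ct BK ((min ct.length BK.length : Nat) : Int) i])
    _ hstepA []]
  -- B's outer loop
  have hstepB : ∀ i ∈ PySem.List.pyRange 0 ((min ct.length BK.length : Nat) : Int) 7,
      ∀ out : List (List Char),
      ((some out).bind fun out =>
        ((PySem.List.pyRange i (min (i + 7) ((min ct.length BK.length : Nat) : Int)) 1).foldl
          (fun v j => v.bind fun v =>
            (PySem.Int.ofChars? [PySem.List.pyGetD ct j ' ']).map (fun a =>
              2 * v + PySem.Int.bxor a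
                (PySem.List.pyGetD (BK.map (fun c => if c = '1' then (1 : Int) else 0)) j 0)))
          (some 0)).bind (fun v =>
            if 0 ≤ v ∧ v < 1114112 then some (out ++ [[Char.ofNat v.toNat]]) else none)) =
      some (out ++ [[chB ct BK ((min ct.length BK.length : Nat) : Int) i]]) := by
    intro i hi out
    obtain ⟨p, q, -⟩ := (PySem.List.mem_pyRange_iff_of_pos (by norm_num) i).1 hi
    rw [Option.bind_some]
    have hstepI : ∀ j ∈ PySem.List.pyRange i
        (min (i + 7) ((min ct.length BK.length : Nat) : Int)) 1, ∀ v : Int,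
        ((some v).bind fun v =>
          (PySem.Int.ofChars? [PySem.List.pyGetD ct j ' ']).map (fun a =>
            2 * v + PySem.Int.bxor a
              (PySem.List.pyGetD (BK.map (fun c => if c = '1' then (1 : Int) else 0)) j 0))) =
        some (2 * v + bitZ ct BK j) := by
      intro j hj v
      rw [PySem.List.mem_pyRange_one] at hj
      have hj0 : 0 ≤ j := by omega
      have hjN : j < ((min ct.length BK.length : Nat) : Int) := by omega
      obtain ⟨hA, hB⟩ := hbin j hj0 hjN
      have hkb : PySem.List.pyGetD (BK.map (fun c => if c = '1' then (1 : Int) else 0)) j 0 =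
          (if PySem.List.pyGetD BK j ' ' = '1' then (1 : Int) else 0) := by
        rw [PySem.List.pyGetD_eq_getElem _ 0 hj0 (by simp; omega),
          PySem.List.pyGetD_eq_getElem BK ' ' hj0 (by omega), List.getElem_map]
      rw [Option.bind_some, hkb]
      simp only [bitZ]
      rcases hA with hA | hA <;> rcases hB with hB | hB <;> rw [hA, hB] <;> rfl
    rw [foldl_option _ (fun v j => 2 * v + bitZ ct BK j) _ hstepI 0]
    rw [Option.bind_some]
    obtain ⟨hge, hlt⟩ := chBval_bounds ct BK ((min ct.length BK.length : Nat) : Int) i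
    rw [if_pos ⟨hge, by omega⟩]
    rfl
  rw [foldl_option _
    (fun out i => out ++ [[chB ct BK ((min ct.length BK.length : Nat) : Int) i]]) _ hstepB []]
  simp only []
  rw [PySem.List.foldl_append_singleton_eq_map, PySem.List.foldl_append_singleton_eq_map,
    List.nil_append, List.nil_append, join_nil_flatten, flatten_singletons]
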